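-- pv_equiv track=rewrite | github.com/zhang123999-qq/DjangoBlog | apps/tools/tool_modules/password_strength_tool.py | _has_sequential
-- ===== SOURCE A (Python) =====
-- def _has_sequential(password):
--     """检测连续字符"""
--     sequences = [
--         "abcdefghijklmnopqrstuvwxyz",
--         "01234567890",
--         "qwertyuiop",
--         "asdfghjkl",
--         "zxcvbnm",
--     ]
--     password_lower = password.lower()
--     for seq in sequences:
--         for i in range(len(seq) - 2):
--             if seq[i : i + 3] in password_lower or seq[i : i + 3][::-1] in password_lower:
--                 return True
--     return False
-- ===== SOURCE B (Python) =====
-- def _has_sequential(password):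
--     """检测连续字符"""
--     sequences = [
--         "abcdefghijklmnopqrstuvwxyz",
--         "01234567890",
--         "qwertyuiop",
--         "asdfghjkl",
--         "zxcvbnm",
--     ]
--     trigrams = set()
--     for seq in sequences:
--         for i in range(len(seq) - 2):
--             tri = seq[i : i + 3]
--             trigrams.add(tri)
--             trigrams.add(tri[::-1])
--     password_lower = password.lower()
--     return any(password_lower[i : i + 3] in trigrams for i in range(len(password_lower) - 2))
-- ===== Notes on version B (the rewrite author's own statement) =====
-- stated objective: alternative
-- what changed: Instead of testing each of the 46 keyboard/alphabet trigrams (and its reverse) for substring containment in the password, B precomputes a set of all forward and reversed trigrams once and scans the password's own consecutive 3-char windows, returning True on the first window found in the set.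
import Mathlib
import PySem

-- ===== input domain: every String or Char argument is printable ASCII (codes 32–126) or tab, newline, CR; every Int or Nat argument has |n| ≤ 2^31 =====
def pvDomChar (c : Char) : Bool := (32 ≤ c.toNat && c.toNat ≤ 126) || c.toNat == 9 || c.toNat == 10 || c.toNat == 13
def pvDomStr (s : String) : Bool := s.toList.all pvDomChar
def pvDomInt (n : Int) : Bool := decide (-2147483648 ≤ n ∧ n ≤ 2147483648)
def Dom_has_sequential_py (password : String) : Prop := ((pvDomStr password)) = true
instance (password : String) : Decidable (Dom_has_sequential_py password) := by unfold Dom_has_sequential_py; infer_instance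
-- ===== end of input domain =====

-- B replaces A's trigram-by-trigram substring search with a precomputed set of all
-- forward/reversed trigrams and a single scan over the password's 3-char windows
-- (objective: alternative decomposition, same exact result).

def pvSeqs : List String :=
  ["abcdefghijklmnopqrstuvwxyz", "01234567890", "qwertyuiop", "asdfghjkl", "zxcvbnm"]

-- ===== PORT A =====
def has_sequential_py (password : String) : Bool :=
  let password_lower := PySem.Str.lower password
  pvSeqs.any (fun seq =>
    (PySem.List.pyRange 0 (PySem.Str.len seq - 2) 1).any (fun i =>
      let tri := PySem.Str.slice seq (some i) (some (i + 3))
      PySem.Str.isIn tri password_lower ||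
        PySem.Str.isIn ((PySem.Str.slice? tri none none (-1)).getD tri) password_lower))

-- ===== PORT B =====
def pvTrigrams : PySem.Set String :=
  pvSeqs.foldl (fun acc seq =>
    (PySem.List.pyRange 0 (PySem.Str.len seq - 2) 1).foldl (fun acc i =>
      let tri := PySem.Str.slice seq (some i) (some (i + 3))
      (acc.add tri).add ((PySem.Str.slice? tri none none (-1)).getD tri)) acc)
    PySem.Set.empty

def has_sequential_py_alt (password : String) : Bool :=
  let password_lower := PySem.Str.lower password
  (PySem.List.pyRange 0 (PySem.Str.len password_lower - 2) 1).any (fun i =>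
    pvTrigrams.contains (PySem.Str.slice password_lower (some i) (some (i + 3))))

-- ===== PRECONDITION & SPEC =====
def Spec_has_sequential_py (password : String) (out : Bool) : Prop := out = has_sequential_py_alt password
instance (password : String) (out : Bool) : Decidable (Spec_has_sequential_py password out) := by unfold Spec_has_sequential_py; infer_instance

-- ===== CLAIM (what is proved, stated in full; the proofs are below) =====
def Claim_equal_has_sequential_py : Prop := ∀ (password : String), Dom_has_sequential_py password → Spec_has_sequential_py password (has_sequential_py password)

-- ===== LEMMAS AND PROOFS =====

-- the trigrams and their reverses, flattened in A's visit order
def pvFlat : List String :=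
  pvSeqs.flatMap (fun seq =>
    (PySem.List.pyRange 0 (PySem.Str.len seq - 2) 1).flatMap (fun i =>
      let tri := PySem.Str.slice seq (some i) (some (i + 3))
      [tri, (PySem.Str.slice? tri none none (-1)).getD tri]))

set_option maxRecDepth 100000 in
lemma pvTrigrams_eq : pvTrigrams = PySem.Set.ofList pvFlat := by decide

set_option maxRecDepth 100000 in
lemma pvFlat_len3 : ∀ t ∈ pvFlat, t.toList.length = 3 := by decide

lemma A_eq_any (p : String) :
    has_sequential_py p = pvFlat.any (fun t => PySem.Str.isIn t (PySem.Str.lower p)) := by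
  simp only [has_sequential_py, pvFlat, List.any_flatMap, List.any_cons, List.any_nil,
    Bool.or_false]

-- a length-3 candidate is a substring iff some 3-char window of s equals it
lemma key (t s : List Char) (h3 : t.length = 3) :
    PySem.Chars.isIn t s = true ↔
      ∃ i : Int, i ∈ PySem.List.pyRange 0 ((s.length : Int) - 2) 1 ∧
        PySem.List.slice s (some i) (some (i + 3)) = t := by
  rw [← PySem.Chars.exists_prefix_drop_iff_isIn]
  constructor
  · rintro ⟨j, hj⟩
    have hlen : t.length ≤ (s.drop j).length := hj.length_le
    rw [List.length_drop, h3] at hlen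
    refine ⟨(j : Int), ?_, ?_⟩
    · rw [PySem.List.mem_pyRange_one]
      constructor
      · exact_mod_cast Nat.zero_le j
      · omega
    · have : ((j : Int) + 3) = ((j : Int) + ((3 : Nat) : Int)) := by norm_num
      rw [this, PySem.List.slice_natCast_add]
      have := List.prefix_iff_eq_take.mp hj
      rw [h3] at this
      exact this.symm
  · rintro ⟨i, hi, hsl⟩
    rw [PySem.List.mem_pyRange_one] at hi
    obtain ⟨j, rfl⟩ : ∃ j : Nat, i = (j : Int) := ⟨i.toNat, (Int.toNat_of_nonneg hi.1).symm⟩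
    refine ⟨j, ?_⟩
    have : ((j : Int) + 3) = ((j : Int) + ((3 : Nat) : Int)) := by norm_num
    rw [this, PySem.List.slice_natCast_add] at hsl
    exact hsl ▸ List.take_prefix 3 (s.drop j)

-- ===== VERDICT (by name: the statement is the Claim_ definition above) =====
theorem has_sequential_py_spec : Claim_equal_has_sequential_py := by
  intro p _
  unfold Spec_has_sequential_py
  rw [Bool.eq_iff_iff, A_eq_any]
  simp only [has_sequential_py_alt, pvTrigrams_eq, List.any_eq_true]
  constructor
  · rintro ⟨t, ht, hin⟩
    rw [PySem.Str.isIn_eq] at hin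
    rw [key t.toList (PySem.Str.lower p).toList (pvFlat_len3 t ht) ] at hin
    obtain ⟨i, hi, hsl⟩ := hin
    refine ⟨i, ?_, ?_⟩
    · simpa [PySem.Str.len_eq] using hi
    · rw [PySem.Set.contains_iff, PySem.Set.mem_ofList]
      have : PySem.Str.slice (PySem.Str.lower p) (some i) (some (i + 3)) = t := by
        apply String.ext
        simpa [PySem.Str.toList_slice] using hsl
      rw [this]; exact ht
  · rintro ⟨i, hi, hc⟩
    rw [PySem.Set.contains_iff, PySem.Set.mem_ofList] at hc
    refine ⟨_, hc, ?_⟩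
    rw [PySem.Str.isIn_eq]
    rw [key _ (PySem.Str.lower p).toList (pvFlat_len3 _ hc)]
    refine ⟨i, ?_, ?_⟩
    · simpa [PySem.Str.len_eq] using hi
    · simp [PySem.Str.toList_slice]
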